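-- pv_equiv track=rewrite | github.com/AlexD29/Licenta | tries/scrape_articles.py | clean_title_adevarul
-- ===== SOURCE A (Python) =====
-- import string
--
-- def clean_title_adevarul(title):
--     extra_words = ['SURSE', 'EXCLUSIV', 'DETALII', 'FOTO', 'VIDEO']
--     cleaned_title = ''
--     word_buffer = ''
--     for char in title:
--         if char in string.whitespace or char in string.punctuation:
--             if word_buffer.upper() not in extra_words:
--                 cleaned_title += word_buffer
--             word_buffer = ''
--             cleaned_title += char
--         else:
--             word_buffer += char
--
--     if word_buffer.upper() not in extra_words:
--         cleaned_title += word_buffer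
--
--     cleaned_title = cleaned_title.rstrip(string.punctuation)
--
--     return cleaned_title.strip()
-- ===== SOURCE B (Python) =====
-- import string
--
-- _SEPS = set(string.whitespace + string.punctuation)
-- _FILLERS = {'SURSE', 'EXCLUSIV', 'DETALII', 'FOTO', 'VIDEO'}
--
-- def clean_title_adevarul(title):
--     # tokenize into (word-run, single separator) pieces, drop filler words, rejoin
--     pieces = []
--     i, n = 0, len(title)
--     while i < n:
--         j = i
--         while j < n and title[j] not in _SEPS:
--             j += 1
--         word = title[i:j]
--         if word.upper() not in _FILLERS:
--             pieces.append(word)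
--         if j < n:
--             pieces.append(title[j])
--             j += 1
--         i = j
--     cleaned = ''.join(pieces).rstrip(string.punctuation)
--     return cleaned.strip()
-- ===== Notes on version B (the rewrite author's own statement) =====
-- stated objective: alternative
-- what changed: Replaced the char-by-char accumulator state machine with a tokenize-then-filter pass: scan to each separator, take the word slice, drop it if it is a filler word, keep separators, then join and do the same rstrip(punctuation)+strip.
import Mathlib
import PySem

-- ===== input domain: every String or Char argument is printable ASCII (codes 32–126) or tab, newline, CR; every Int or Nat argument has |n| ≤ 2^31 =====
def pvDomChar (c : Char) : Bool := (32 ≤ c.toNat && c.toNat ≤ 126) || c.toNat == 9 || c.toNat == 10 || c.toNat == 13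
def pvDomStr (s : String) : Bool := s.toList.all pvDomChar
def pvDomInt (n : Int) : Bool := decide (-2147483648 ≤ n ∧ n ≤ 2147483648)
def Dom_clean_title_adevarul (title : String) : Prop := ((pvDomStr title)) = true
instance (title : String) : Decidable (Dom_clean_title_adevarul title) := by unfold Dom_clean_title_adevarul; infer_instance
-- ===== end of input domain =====

-- B replaces A's char-by-char accumulator state machine by a tokenize-then-filter pass (alternative decomposition, same cost).

-- ===== PORT A =====
-- string.punctuation
def pvPunct : List Char := "!\"#$%&'()*+,-./:;<=>?@[\\]^_`{|}~".toList
-- string.whitespace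
def pvWs : List Char := " \t\n\r\x0b\x0c".toList
-- extra_words
def pvExtraWords : List (List Char) :=
  ["SURSE".toList, "EXCLUSIV".toList, "DETALII".toList, "FOTO".toList, "VIDEO".toList]

-- the body of A's for-loop, state = (cleaned_title, word_buffer)
def pvStepA (st : List Char × List Char) (c : Char) : List Char × List Char :=
  if pvWs.contains c || pvPunct.contains c then
    ((st.1 ++ (if pvExtraWords.contains (PySem.Chars.upper st.2) then [] else st.2)) ++ [c], [])
  else
    (st.1, st.2 ++ [c])

def clean_title_adevarul (title : String) : String :=
  let st := title.toList.foldl pvStepA ([], [])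
  let cleaned := st.1 ++ (if pvExtraWords.contains (PySem.Chars.upper st.2) then [] else st.2)
  -- cleaned.rstrip(string.punctuation): hand port, exact (drops trailing chars of the set)
  let cleaned := (cleaned.reverse.dropWhile (fun c => pvPunct.contains c)).reverse
  String.mk (PySem.Chars.strip cleaned)

-- ===== PORT B =====
-- _SEPS = set(string.whitespace + string.punctuation)
def pvSeps : List Char :=
  PySem.Set.ofList (" \t\n\r\x0b\x0c!\"#$%&'()*+,-./:;<=>?@[\\]^_`{|}~".toList)
-- _FILLERS
def pvFillers : List (List Char) :=
  PySem.Set.ofList ["SURSE".toList, "EXCLUSIV".toList, "DETALII".toList, "FOTO".toList, "VIDEO".toList]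

-- B's outer while-loop: at each position take the word run up to the next separator,
-- drop it if it is a filler, keep the single separator char, continue after it.
def pvTokens : List Char → List (List Char)
  | [] => []
  | c :: cs =>
    let word := (c :: cs).takeWhile (fun d => !pvSeps.contains d)
    let w := if pvFillers.contains (PySem.Chars.upper word) then [] else word
    match hr : (c :: cs).dropWhile (fun d => !pvSeps.contains d) with
    | [] => [w]
    | d :: rs => w :: [d] :: pvTokens rs -- hr is used in decreasing_by
termination_by cs => cs.length
decreasing_by
  have h := List.length_dropWhile_le (fun d => !pvSeps.contains d) (c :: cs)
  rw [hr] at h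
  simp at h ⊢
  omega

def clean_title_adevarul_alt (title : String) : String :=
  let cleaned := (pvTokens title.toList).flatten
  -- .rstrip(string.punctuation): hand port, exact (drops trailing chars of the set)
  let cleaned := (cleaned.reverse.dropWhile (fun c => pvPunct.contains c)).reverse
  String.mk (PySem.Chars.strip cleaned)

-- ===== PRECONDITION & SPEC =====
def Spec_clean_title_adevarul (title : String) (out : String) : Prop := out = clean_title_adevarul_alt title
instance (title : String) (out : String) : Decidable (Spec_clean_title_adevarul title out) := by unfold Spec_clean_title_adevarul; infer_instance

-- ===== CLAIM (what is proved, stated in full; the proofs are below) =====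
def Claim_equal_clean_title_adevarul : Prop := ∀ (title : String), Dom_clean_title_adevarul title → Spec_clean_title_adevarul title (clean_title_adevarul title)

-- ===== LEMMAS AND PROOFS =====

-- what A appends for a finished word buffer
def pvEmit (b : List Char) : List Char :=
  if pvExtraWords.contains (PySem.Chars.upper b) then [] else b

-- B's flattened output from position cs, with buf prepended to the first word run
def pvBflat (buf cs : List Char) : List Char :=
  pvEmit (buf ++ cs.takeWhile (fun d => !pvSeps.contains d)) ++
    (match cs.dropWhile (fun d => !pvSeps.contains d) with
     | [] => []
     | d :: rs => d :: (pvTokens rs).flatten)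

lemma pv_sep_eq (c : Char) : (pvWs.contains c || pvPunct.contains c) = pvSeps.contains c := by
  have h : pvSeps = pvWs ++ pvPunct := by decide
  simp [h, List.mem_append]

lemma pvEmit_nil : pvEmit [] = [] := by decide

lemma pv_fillers_eq : pvFillers = pvExtraWords := by decide

lemma pv_tokens_flatten (cs : List Char) : (pvTokens cs).flatten = pvBflat [] cs := by
  cases cs with
  | nil =>
    rw [pvTokens.eq_def]
    simp [pvBflat, pvEmit_nil]
  | cons c cs =>
    rw [pvTokens.eq_def]
    simp only [pvBflat, List.nil_append]
    split <;> rename_i hd <;> rw [hd] <;> simp [pvEmit, pv_fillers_eq]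

lemma pv_foldA_spec (cs : List Char) : ∀ acc buf,
    (cs.foldl pvStepA (acc, buf)).1 ++ pvEmit (cs.foldl pvStepA (acc, buf)).2
      = acc ++ pvBflat buf cs := by
  induction cs with
  | nil => intro acc buf; simp [pvBflat, pvEmit]
  | cons c cs ih =>
    intro acc buf
    by_cases hs : pvSeps.contains c = true
    · have hc : c ∈ pvSeps := by simpa using hs
      have hA : (pvWs.contains c || pvPunct.contains c) = true := (pv_sep_eq c).trans hs
      have hstep : pvStepA (acc, buf) c = ((acc ++ pvEmit buf) ++ [c], []) := by
        simp only [pvStepA, hA, if_true, pvEmit]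
      have hrhs : pvBflat buf (c :: cs) = pvEmit buf ++ c :: (pvTokens cs).flatten := by
        simp only [pvBflat]
        simp [hc]
      rw [List.foldl_cons, hstep, ih, hrhs, ← pv_tokens_flatten]
      simp [List.append_assoc]
    · have hc : c ∉ pvSeps := by simpa using hs
      have hA : (pvWs.contains c || pvPunct.contains c) = false := by
        rw [pv_sep_eq]; simpa using hs
      have hstep : pvStepA (acc, buf) c = (acc, buf ++ [c]) := by
        simp only [pvStepA, hA, Bool.false_eq_true, if_false]
      have hrhs : pvBflat buf (c :: cs) = pvBflat (buf ++ [c]) cs := by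
        simp only [pvBflat]
        simp [hc, List.append_assoc]
      rw [List.foldl_cons, hstep, ih, hrhs]

-- ===== VERDICT (by name: the statement is the Claim_ definition above) =====
theorem clean_title_adevarul_spec : Claim_equal_clean_title_adevarul := by
  intro title _
  unfold Spec_clean_title_adevarul clean_title_adevarul clean_title_adevarul_alt
  have h := pv_foldA_spec title.toList [] []
  rw [pv_tokens_flatten]
  simp only [List.nil_append] at h
  simp only [← h, pvEmit]
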